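-- pv_equiv track=rewrite | github.com/otavioabreu27/aplicacao-queimadas | src/data.py | highestAndLowestRiskPoints
-- ===== SOURCE A (Python) =====
-- def highestAndLowestRiskPoints(dataArray: list) -> list:
--     '''Gets the dataArray and find the regions with the highest and the
--     lowest numbers of high risk points.'''
--     highRiskCountArray = [[0, "sul"], [0, "nordeste"], [0, "norte"],
--                           [0, "sudeste"], [0, "centroOeste"]]
--
--     for row in dataArray:
--         if row[1] == "alto":
--             if row[2] == "sul":
--                 highRiskCountArray[0][0] += 1
--             elif row[2] == "nordeste":
--                 highRiskCountArray[1][0] += 1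
--             elif row[2] == "norte":
--                 highRiskCountArray[2][0] += 1
--             elif row[2] == "sudeste":
--                 highRiskCountArray[3][0] += 1
--             elif row[2] == "centro oeste":
--                 highRiskCountArray[4][0] += 1
--
--     highRiskCountArray.sort(reverse=True, key=lambda x: x[0])
--     return [highRiskCountArray[0][1], highRiskCountArray[-1][1]]
-- ===== SOURCE B (Python) =====
-- def highestAndLowestRiskPoints(dataArray: list) -> list:
--     '''Region with the most and region with the fewest high risk points:
--     count each region directly, then pick max (first on ties) and min
--     (last on ties) in one scan instead of sorting.'''
--     regions = [("sul", "sul"), ("nordeste", "nordeste"), ("norte", "norte"),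
--                ("sudeste", "sudeste"), ("centroOeste", "centro oeste")]
--     counts = [(sum(1 for row in dataArray if row[1] == "alto" and row[2] == raw), name)
--               for name, raw in regions]
--     hi = lo = counts[0]
--     for cur in counts[1:]:
--         if cur[0] > hi[0]:
--             hi = cur
--         if cur[0] <= lo[0]:
--             lo = cur
--     return [hi[1], lo[1]]
-- ===== Notes on version B (the rewrite author's own statement) =====
-- stated objective: simpler
-- what changed: B counts each region's high-risk rows directly (one sum per fixed region) and picks the highest (first on ties, strict >) and lowest (last on ties, <=) in a single selection scan over the fixed region list, instead of A's slot-table update loop followed by a stable reverse sort and indexing the sorted list.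
import Mathlib
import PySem

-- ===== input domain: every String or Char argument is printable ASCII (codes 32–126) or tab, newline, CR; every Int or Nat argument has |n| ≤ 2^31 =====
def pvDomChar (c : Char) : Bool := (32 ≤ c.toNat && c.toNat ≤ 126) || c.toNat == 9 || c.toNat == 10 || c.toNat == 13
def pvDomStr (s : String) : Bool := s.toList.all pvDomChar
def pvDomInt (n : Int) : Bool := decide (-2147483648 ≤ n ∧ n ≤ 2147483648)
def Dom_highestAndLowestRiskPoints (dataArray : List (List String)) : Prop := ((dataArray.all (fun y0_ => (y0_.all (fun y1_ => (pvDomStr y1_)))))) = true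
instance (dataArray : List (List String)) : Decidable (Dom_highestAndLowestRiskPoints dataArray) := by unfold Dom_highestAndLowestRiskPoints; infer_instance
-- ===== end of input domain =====

-- B replaces A's count-then-stable-reverse-sort with per-region direct counts and one max/min
-- selection scan (first region wins max ties, last wins min ties) — objective: simpler.

-- ===== PORT A =====
-- the fixed initial [[0,"sul"],…] table of A
def pvInit : List (Int × String) := [(0, "sul"), (0, "nordeste"), (0, "norte"), (0, "sudeste"), (0, "centroOeste")]

-- A's loop body: row[1] == "alto", then the elif chain on row[2] bumping the matching slot
def pvStepA (acc : List (Int × String)) (row : List String) : List (Int × String) :=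
  if PySem.List.pyGet? row 1 = some "alto" then
    if PySem.List.pyGet? row 2 = some "sul" then acc.modify 0 (fun p => (p.1 + 1, p.2))
    else if PySem.List.pyGet? row 2 = some "nordeste" then acc.modify 1 (fun p => (p.1 + 1, p.2))
    else if PySem.List.pyGet? row 2 = some "norte" then acc.modify 2 (fun p => (p.1 + 1, p.2))
    else if PySem.List.pyGet? row 2 = some "sudeste" then acc.modify 3 (fun p => (p.1 + 1, p.2))
    else if PySem.List.pyGet? row 2 = some "centro oeste" then acc.modify 4 (fun p => (p.1 + 1, p.2))
    else acc
  else acc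

def highestAndLowestRiskPoints (dataArray : List (List String)) : List String :=
  let arr := dataArray.foldl pvStepA pvInit
  let s := PySem.List.sorted arr (fun p => p.1) true
  [(PySem.List.pyGetD s 0 ((0 : Int), "")).2, (PySem.List.pyGetD s (-1) ((0 : Int), "")).2]

-- ===== PORT B =====
-- sum(1 for row in dataArray if row[1] == "alto" and row[2] == raw)
def pvCnt (dataArray : List (List String)) (raw : String) : Int :=
  ((dataArray.countP (fun row => PySem.List.pyGet? row 1 == some "alto" && PySem.List.pyGet? row 2 == some raw) : Nat) : Int)

-- the fixed (label, raw string) table of B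
def pvRegions : List (String × String) :=
  [("sul", "sul"), ("nordeste", "nordeste"), ("norte", "norte"), ("sudeste", "sudeste"), ("centroOeste", "centro oeste")]

-- B's loop body: hi takes cur on strictly greater count, lo takes cur on less-or-equal count
def pvSelStep (p : (Int × String) × (Int × String)) (cur : Int × String) : (Int × String) × (Int × String) :=
  ((if cur.1 > p.1.1 then cur else p.1), (if cur.1 ≤ p.2.1 then cur else p.2))

def highestAndLowestRiskPoints_alt (dataArray : List (List String)) : List String :=
  let counts : List (Int × String) := pvRegions.map (fun r => (pvCnt dataArray r.2, r.1))
  match counts with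
  | [] => []   -- unreachable: counts always has 5 entries (Python reads counts[0] directly)
  | c0 :: rest =>
    let p := rest.foldl pvSelStep (c0, c0)
    [p.1.2, p.2.2]

-- ===== PRECONDITION & SPEC =====
-- Pre_ excludes exactly the inputs on which Python A raises IndexError: a row shorter than 2,
-- or a row whose second entry is "alto" shorter than 3 (row[2] is read only for "alto" rows).
def Pre_highestAndLowestRiskPoints (dataArray : List (List String)) : Prop :=
  ∀ row ∈ dataArray, 2 ≤ row.length ∧ (PySem.List.pyGet? row 1 = some "alto" → 3 ≤ row.length)
instance (dataArray : List (List String)) : Decidable (Pre_highestAndLowestRiskPoints dataArray) := by unfold Pre_highestAndLowestRiskPoints; infer_instance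

def pvWitness_highestAndLowestRiskPoints : List (List String) :=
  [["1", "alto", "sul"], ["2", "baixo"], ["3", "alto", "centro oeste"]]

def Spec_highestAndLowestRiskPoints (dataArray : List (List String)) (out : List String) : Prop := out = highestAndLowestRiskPoints_alt dataArray
instance (dataArray : List (List String)) (out : List String) : Decidable (Spec_highestAndLowestRiskPoints dataArray out) := by unfold Spec_highestAndLowestRiskPoints; infer_instance

-- ===== CLAIM (what is proved, stated in full; the proofs are below) =====
def Claim_equal_highestAndLowestRiskPoints : Prop := ∀ (dataArray : List (List String)), Dom_highestAndLowestRiskPoints dataArray → Pre_highestAndLowestRiskPoints dataArray → Spec_highestAndLowestRiskPoints dataArray (highestAndLowestRiskPoints dataArray)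

-- ===== LEMMAS AND PROOFS =====

-- the comparison A's reverse sort uses: x goes before y iff y.1 < x.1
def pvPred (x y : Int × String) : Bool := decide (y.1 < x.1)

-- A's counting loop ends with each slot holding its region's high-risk count
theorem pv_foldA (l : List (List String)) : ∀ (a b c d e : Int),
    l.foldl pvStepA [(a,"sul"),(b,"nordeste"),(c,"norte"),(d,"sudeste"),(e,"centroOeste")] =
    [(a + pvCnt l "sul","sul"), (b + pvCnt l "nordeste","nordeste"), (c + pvCnt l "norte","norte"),
     (d + pvCnt l "sudeste","sudeste"), (e + pvCnt l "centro oeste","centroOeste")] := by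
  induction l with
  | nil => intro a b c d e; simp [pvCnt]
  | cons r l ih =>
    intro a b c d e
    simp only [List.foldl_cons, pvStepA]
    split_ifs with h1 h2 h3 h4 h5 h6 <;>
      simp_all [List.modify, pvCnt] <;> omega

theorem pv_head_ins (x h : Int × String) (t : List (Int × String)) :
    (PySem.List.insertBy pvPred x (h :: t)).head? = some (if x.1 > h.1 then x else h) := by
  simp only [PySem.List.insertBy, pvPred]
  split_ifs with h1 h2 h3 <;> simp_all

-- x lands at the very end of the insertion iff it is ≤ everything already placed
theorem pv_last_ins_min (x : Int × String) (l : List (Int × String)) (hmin : ∀ y ∈ l, x.1 ≤ y.1) :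
    (PySem.List.insertBy pvPred x l).getLast? = some x := by
  induction l with
  | nil => simp [PySem.List.insertBy]
  | cons y ys ih =>
    have hy : x.1 ≤ y.1 := hmin y (by simp)
    simp only [PySem.List.insertBy, pvPred]
    rw [if_neg (by simp; omega)]
    rw [List.getLast?_cons, ih (fun z hz => hmin z (by simp [hz]))]
    simp

theorem pv_last_ins_not (x : Int × String) (l : List (Int × String)) (hex : ∃ y ∈ l, y.1 < x.1) :
    (PySem.List.insertBy pvPred x l).getLast? = l.getLast? := by
  induction l with
  | nil => simp at hex
  | cons y ys ih =>
    simp only [PySem.List.insertBy, pvPred]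
    split_ifs with h1
    · simp [List.getLast?_cons]
    · simp only [decide_eq_true_eq] at h1
      rcases hex with ⟨z, hz, hlt⟩
      rcases List.mem_cons.mp hz with rfl | hz'
      · omega
      · rw [List.getLast?_cons, ih ⟨z, hz', hlt⟩, List.getLast?_cons]

-- the invariant tying the insertion-sort state to B's (hi, lo) scan state
theorem pv_inv (xs : List (Int × String)) : ∀ (s : List (Int × String)) (hi lo : Int × String),
    s.head? = some hi → s.getLast? = some lo →
    (∀ y ∈ s, y.1 ≤ hi.1) → (∀ y ∈ s, lo.1 ≤ y.1) →
    (xs.foldl (fun acc x => PySem.List.insertBy pvPred x acc) s).head? = some (xs.foldl pvSelStep (hi, lo)).1 ∧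
    (xs.foldl (fun acc x => PySem.List.insertBy pvPred x acc) s).getLast? = some (xs.foldl pvSelStep (hi, lo)).2 ∧
    (∀ y ∈ xs.foldl (fun acc x => PySem.List.insertBy pvPred x acc) s, y.1 ≤ (xs.foldl pvSelStep (hi, lo)).1.1) ∧
    (∀ y ∈ xs.foldl (fun acc x => PySem.List.insertBy pvPred x acc) s, (xs.foldl pvSelStep (hi, lo)).2.1 ≤ y.1) := by
  induction xs with
  | nil => intro s hi lo hh hl hbh hbl; exact ⟨hh, hl, hbh, hbl⟩
  | cons x xs ih =>
    intro s hi lo hh hl hbh hbl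
    cases s with
    | nil => simp at hh
    | cons h t =>
      have hEq : hi = h := by simpa using hh.symm
      subst hEq
      simp only [List.foldl_cons]
      have hstep : pvSelStep (hi, lo) x = ((if x.1 > hi.1 then x else hi), (if x.1 ≤ lo.1 then x else lo)) := rfl
      have hh' : (PySem.List.insertBy pvPred x (hi :: t)).head? = some (if x.1 > hi.1 then x else hi) :=
        pv_head_ins x hi t
      have hl' : (PySem.List.insertBy pvPred x (hi :: t)).getLast? = some (if x.1 ≤ lo.1 then x else lo) := by
        split_ifs with hle
        · exact pv_last_ins_min x (hi :: t) (fun y hy => le_trans hle (hbl y hy))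
        · have hlo : lo ∈ hi :: t := List.mem_of_getLast? hl
          exact (pv_last_ins_not x (hi :: t) ⟨lo, hlo, by omega⟩).trans hl
      have hbh' : ∀ y ∈ PySem.List.insertBy pvPred x (hi :: t), y.1 ≤ (if x.1 > hi.1 then x else hi).1 := by
        intro y hy
        rcases (PySem.List.mem_insertBy pvPred x y (hi :: t)).mp hy with rfl | hy'
        · split_ifs <;> omega
        · have := hbh y hy'; split_ifs <;> omega
      have hbl' : ∀ y ∈ PySem.List.insertBy pvPred x (hi :: t), (if x.1 ≤ lo.1 then x else lo).1 ≤ y.1 := by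
        intro y hy
        rcases (PySem.List.mem_insertBy pvPred x y (hi :: t)).mp hy with rfl | hy'
        · split_ifs <;> omega
        · have := hbl y hy'; split_ifs <;> omega
      have := ih (PySem.List.insertBy pvPred x (hi :: t)) _ _ hh' hl' hbh' hbl'
      simpa [hstep] using this

-- xs[0] / xs[-1] read the head and the last element
theorem pv_getdd (s : List (Int × String)) (hi lo d : Int × String)
    (hh : s.head? = some hi) (hl : s.getLast? = some lo) :
    [(PySem.List.pyGetD s 0 d).2, (PySem.List.pyGetD s (-1) d).2] = [hi.2, lo.2] := by
  cases s with
  | nil => simp at hh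
  | cons a t =>
    have hEq : a = hi := by simpa using hh
    subst hEq
    have h1 : PySem.List.pyGetD (a :: t) 0 d = a := by
      simp [PySem.List.pyGetD, PySem.List.pyGet?, PySem.List.pyIdx?]
    have h2 : PySem.List.pyGetD (a :: t) (-1) d = lo := by
      simp only [PySem.List.pyGetD, PySem.List.pyGet?, PySem.List.pyIdx?]
      rw [if_neg (by decide), if_pos (by push_cast [List.length_cons]; omega)]
      have h3 : (a :: t).length - (-(-1 : Int)).toNat = (a :: t).length - 1 := by norm_num
      rw [h3, List.getLast?_eq_getElem?] at *
      simp only [Option.bind_some]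
      rw [hl]
      rfl
    rw [h1, h2]

-- first/last of the stable reverse sort = B's strict-max / le-min selection scan
theorem pv_sel (c1 c2 c3 c4 c5 : Int) :
    (let s := PySem.List.sorted [(c1,"sul"),(c2,"nordeste"),(c3,"norte"),(c4,"sudeste"),(c5,"centroOeste")]
                (fun p => p.1) true
     [(PySem.List.pyGetD s 0 ((0 : Int), "")).2, (PySem.List.pyGetD s (-1) ((0 : Int), "")).2])
    = (let p := [(c2,"nordeste"),(c3,"norte"),(c4,"sudeste"),(c5,"centroOeste")].foldl pvSelStep ((c1,"sul"), (c1,"sul"))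
       [p.1.2, p.2.2]) := by
  rw [PySem.List.sorted_rev_eq_foldl_insertBy]
  have hfold :
      List.foldl (fun acc x => PySem.List.insertBy (fun a b => decide ((fun p : Int × String => p.1) b < (fun p : Int × String => p.1) a)) x acc) []
        [(c1,"sul"),(c2,"nordeste"),(c3,"norte"),(c4,"sudeste"),(c5,"centroOeste")]
      = List.foldl (fun acc x => PySem.List.insertBy pvPred x acc) [(c1,"sul")]
        [(c2,"nordeste"),(c3,"norte"),(c4,"sudeste"),(c5,"centroOeste")] := rfl
  rw [hfold]
  obtain ⟨hh, hl, -, -⟩ :=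
    pv_inv [(c2,"nordeste"),(c3,"norte"),(c4,"sudeste"),(c5,"centroOeste")] [(c1,"sul")]
      (c1,"sul") (c1,"sul") (by simp) (by simp) (by simp) (by simp)
  exact pv_getdd _ _ _ _ hh hl

-- ===== VERDICT (by name: the statement is the Claim_ definition above) =====
theorem highestAndLowestRiskPoints_spec : Claim_equal_highestAndLowestRiskPoints := by
  intro dataArray _ _
  show highestAndLowestRiskPoints dataArray = highestAndLowestRiskPoints_alt dataArray
  unfold highestAndLowestRiskPoints highestAndLowestRiskPoints_alt pvInit pvRegions
  simp only [List.map_cons, List.map_nil, pv_foldA, zero_add]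
  exact pv_sel _ _ _ _ _
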